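-- pv_equiv track=rewrite | github.com/rawatamit/adventofcode | 2018/d16.py | find_opcode_mapping
-- ===== SOURCE A (Python) =====
-- def find_opcode_mapping(opcode_map):
--     # invariant: Q only has op which have a 1-1 mapping
--     Q = [op
--         for op, opcode in opcode_map.items()
--         if len(opcode) == 1]
--
--     mapping = {}
--
--     while Q:
--         op_set = Q.pop()
--         opcode = opcode_map[op_set].pop()
--         mapping[opcode] = op_set
--
--         for op, opcodes in opcode_map.items():
--             if op not in mapping and opcode in opcodes:
--                 opcodes.remove(opcode)
--                 if len(opcodes) == 1:
--                     Q.append(op)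
--
--     return mapping
-- ===== SOURCE B (Python) =====
-- def find_opcode_mapping(opcode_map):
--     # Inverted index: opcode -> ops whose candidate list contains it, in dict order.
--     contains = {}
--     for op, cs in opcode_map.items():
--         for c in cs:
--             contains.setdefault(c, []).append(op)
--
--     stack = [op for op, cs in opcode_map.items() if len(cs) == 1]
--     assigned = set()   # opcodes already assigned
--     done = set()       # ops already assigned
--     mapping = {}
--     while stack:
--         op = stack.pop()
--         opcode = next(c for c in opcode_map[op] if c not in assigned)
--         mapping[opcode] = op
--         assigned.add(opcode)
--         done.add(op)
--         for o in contains.get(opcode, []):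
--             if o not in done and sum(c not in assigned for c in opcode_map[o]) == 1:
--                 stack.append(o)
--     return mapping
-- ===== Notes on version B (the rewrite author's own statement) =====
-- stated objective: alternative
-- what changed: B never mutates the candidate lists: it precomputes an inverted opcode-to-ops index once and tracks a set of assigned opcodes, so each propagation step scans only the ops containing the assigned opcode and recomputes residual counts, instead of A's in-place remove/pop on every list of the dict.
-- outside the precondition, e.g. on find_opcode_mapping({'a': [1], 'b': [1, 1]}): A returns {1: 'b'}, B returns {1: 'a'}
import Mathlib
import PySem

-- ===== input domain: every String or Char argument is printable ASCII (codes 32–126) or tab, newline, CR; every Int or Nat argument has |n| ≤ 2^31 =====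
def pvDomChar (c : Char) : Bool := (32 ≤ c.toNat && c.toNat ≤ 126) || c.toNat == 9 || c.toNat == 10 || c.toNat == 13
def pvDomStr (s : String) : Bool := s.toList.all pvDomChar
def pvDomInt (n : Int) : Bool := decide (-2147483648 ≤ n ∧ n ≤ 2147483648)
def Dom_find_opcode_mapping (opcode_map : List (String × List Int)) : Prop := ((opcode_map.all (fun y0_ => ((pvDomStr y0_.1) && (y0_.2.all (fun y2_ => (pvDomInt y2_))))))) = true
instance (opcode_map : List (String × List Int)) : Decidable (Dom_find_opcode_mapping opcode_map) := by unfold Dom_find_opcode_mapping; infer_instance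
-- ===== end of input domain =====

-- B replaces A's in-place candidate-list mutation (remove/pop on shared lists) by an immutable map,
-- a set of assigned opcodes, and an inverted opcode→ops index that limits each propagation step to the
-- ops actually containing the assigned opcode (objective: alternative). A mutates its argument in place
-- (empties the candidate lists); B does not — the equivalence proved here is about the return value only.

-- ===== PORT A =====
-- dict assignment 'mapping[opcode] = op' (overwrite keeps position, new keys append)
def pvDinsert : List (Int × String) → Int → String → List (Int × String)
  | [], k, v => [(k, v)]
  | (k', v') :: rest, k, v =>
    if k' = k then (k', v) :: rest else (k', v') :: pvDinsert rest k v

-- in-place update of the entry 'op' of the dict (first matching key)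
def pvSetEntry : List (String × List Int) → String → List Int → List (String × List Int)
  | [], _, _ => []
  | (o, l) :: rest, op, nl =>
    if o = op then (o, nl) :: rest else (o, l) :: pvSetEntry rest op nl

-- A's inner 'for op, opcodes in opcode_map.items():' pass; the Python guard 'op not in mapping'
-- is vacuously true (mapping is keyed by int opcodes, op is a str), so it is not ported.
-- returns (the dict after the in-place removes, the ops appended to Q, in iteration order)
def pvRemovePass (k : Int) : List (String × List Int) → List (String × List Int) × List String
  | [] => ([], [])
  | (o, l) :: rest =>
    let r := pvRemovePass k rest
    if k ∈ l then
      let l' := l.erase k                                   -- list.remove: first occurrence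
      ((o, l') :: r.1, if l'.length = 1 then o :: r.2 else r.2)
    else ((o, l) :: r.1, r.2)

-- 'while Q:' — fuel bounds the iteration count (≥ len + Σ len + 1, never reached: each
-- iteration pops one op and strictly shrinks |Q| + Σ lengths)
def pvLoopA : Nat → List (String × List Int) → List String → List (Int × String) → List (Int × String)
  | 0, _, _, mp => mp
  | f+1, M, Q, mp =>
    match Q.getLast? with
    | none => mp                                             -- Q empty: loop ends
    | some op =>
      let Q1 := Q.dropLast                                   -- Q.pop()
      let cs := (List.lookup op M).getD []                   -- opcode_map[op_set]
      let k := cs.getLast?.getD 0                            -- .pop(); IndexError on [] is outside Pre_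
      let pr := pvRemovePass k (pvSetEntry M op cs.dropLast)
      pvLoopA f pr.1 (Q1 ++ pr.2) (pvDinsert mp k op)

def find_opcode_mapping (opcode_map : List (String × List Int)) : List (Int × String) :=
  pvLoopA (opcode_map.length + (opcode_map.map (fun p => p.2.length)).sum + 1)
    opcode_map
    ((opcode_map.filter (fun p => p.2.length == 1)).map (·.1))   -- Q = [op for …, if len == 1]
    []

-- ===== PORT B =====
-- contains.setdefault(c, []).append(op)
def pvAddContains : List (Int × List String) → Int → String → List (Int × List String)
  | [], c, op => [(c, [op])]
  | (k, os) :: rest, c, op =>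
    if k = c then (k, os ++ [op]) :: rest else (k, os) :: pvAddContains rest c op

-- the inverted index: opcode -> ops whose candidate list contains it, in dict order
def pvBuildContains (opcode_map : List (String × List Int)) : List (Int × List String) :=
  opcode_map.foldl (fun ct p => p.2.foldl (fun ct c => pvAddContains ct c p.1) ct) []

-- 'while stack:' — same fuel convention as pvLoopA
def pvLoopB (S : List (String × List Int)) (ct : List (Int × List String)) :
    Nat → List String → List Int → List String → List (Int × String) → List (Int × String)
  | 0, _, _, _, mp => mp
  | f+1, stack, asg, done, mp =>
    match stack.getLast? with
    | none => mp
    | some op =>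
      let st1 := stack.dropLast                              -- stack.pop()
      let cs := (List.lookup op S).getD []                   -- opcode_map[op] (never mutated)
      let k := (cs.find? (fun c => !(asg.contains c))).getD 0  -- next(...); StopIteration outside Pre_
      let mp1 := pvDinsert mp k op                           -- mapping[opcode] = op
      let asg1 := PySem.Set.add asg k
      let done1 := PySem.Set.add done op
      let adds := ((List.lookup k ct).getD []).filter (fun o =>
        !(done1.contains o) &&
        (((List.lookup o S).getD []).countP (fun c => !(asg1.contains c)) == 1))
      pvLoopB S ct f (st1 ++ adds) asg1 done1 mp1

def find_opcode_mapping_alt (opcode_map : List (String × List Int)) : List (Int × String) :=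
  pvLoopB opcode_map (pvBuildContains opcode_map)
    (opcode_map.length + (opcode_map.map (fun p => p.2.length)).sum + 1)
    ((opcode_map.filter (fun p => p.2.length == 1)).map (·.1))
    [] [] []

-- ===== PRECONDITION & SPEC =====
-- a system of distinct representatives for a family of candidate lists, by exhaustive search
def pvHasSDR : List (List Int) → List Int → Bool
  | [], _ => true
  | s :: rest, used => s.any (fun k => !(used.contains k) && pvHasSDR rest (k :: used))

-- The forced-assignment closure: the set of opcodes an exact constraint propagation is forced to
-- assign, computed as an order-independent round-based saturation (one parallel round = pvStep;
-- this is not the worklist algorithm of either port).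
def pvStep1b (acc r : List Int) : List Int :=
  if r.length = 1 ∧ acc.contains (r.headD 0) = false then acc ++ [r.headD 0] else acc

def pvStep1 (D acc : List Int) (p : String × List Int) : List Int :=
  pvStep1b acc (p.2.filter (fun c => !(D.contains c)))

def pvStep (S : List (String × List Int)) (D : List Int) : List Int :=
  S.foldl (pvStep1 D) D

-- iterate rounds until the fixpoint (fuel is an upper bound, never reached)
def pvIter (S : List (String × List Int)) : Nat → List Int → List Int
  | 0, D => D
  | n+1, D => if pvStep S D = D then D else pvIter S n (pvStep S D)

def pvClosure (S : List (String × List Int)) : List Int :=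
  pvIter S ((S.map (fun p => p.2.length)).sum + 1) []

-- Pre_ excludes: (a) assoc lists with duplicate keys — the Python argument is a dict, so no dict
-- corresponds to them; (b) candidate lists with repeated elements — they stand for candidate *sets*,
-- and A's first-occurrence remove / dict-overwrite behaviour on duplicates is accidental; and
-- (c) exactly the inputs on which A raises IndexError (pop from an empty candidate list): those
-- whose forced-assignment closure starves some fully-covered op, i.e. the ops whose candidates all
-- lie inside pvClosure admit no system of distinct representatives.
def Pre_find_opcode_mapping (opcode_map : List (String × List Int)) : Prop :=
  (opcode_map.map (·.1)).Nodup ∧ (∀ p ∈ opcode_map, p.2.Nodup) ∧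
  pvHasSDR (((opcode_map.filter (fun p => p.2.all (fun c => (pvClosure opcode_map).contains c))).map (·.2)).filter (· ≠ [])) [] = true

instance (opcode_map : List (String × List Int)) : Decidable (Pre_find_opcode_mapping opcode_map) := by
  unfold Pre_find_opcode_mapping; infer_instance

def pvWitness_find_opcode_mapping : (List (String × List Int)) :=
  [("a", [1]), ("b", [1, 2])]

def Spec_find_opcode_mapping (opcode_map : List (String × List Int)) (out : List (Int × String)) : Prop := out = find_opcode_mapping_alt opcode_map
instance (opcode_map : List (String × List Int)) (out : List (Int × String)) : Decidable (Spec_find_opcode_mapping opcode_map out) := by unfold Spec_find_opcode_mapping; infer_instance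

-- ===== CLAIM (what is proved, stated in full; the proofs are below) =====
def Claim_equal_find_opcode_mapping : Prop := ∀ (opcode_map : List (String × List Int)), Dom_find_opcode_mapping opcode_map → Pre_find_opcode_mapping opcode_map → Spec_find_opcode_mapping opcode_map (find_opcode_mapping opcode_map)

-- ===== LEMMAS AND PROOFS =====

-- ---- facts about the closure ----

theorem pv_step1b_cases (acc r : List Int) :
    pvStep1b acc r = acc ∨ ∃ k, r = [k] ∧ acc.contains k = false ∧ pvStep1b acc r = acc ++ [k] := by
  unfold pvStep1b
  split_ifs with h
  · obtain ⟨h1, h2⟩ := h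
    obtain ⟨k, hk⟩ := List.length_eq_one_iff.mp h1
    subst hk
    exact Or.inr ⟨k, rfl, h2, rfl⟩
  · exact Or.inl rfl

theorem pv_step1_mem (D acc : List Int) (p : String × List Int) (x : Int) (h : x ∈ acc) :
    x ∈ pvStep1 D acc p := by
  unfold pvStep1
  rcases pv_step1b_cases acc (p.2.filter (fun c => !(D.contains c))) with he | ⟨k, _, _, he⟩ <;>
    rw [he] <;> simp [h]

theorem pv_fold_mem (D : List Int) (l : List (String × List Int)) :
    ∀ acc x, x ∈ acc → x ∈ l.foldl (pvStep1 D) acc := by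
  induction l with
  | nil => intro acc x h; simpa using h
  | cons a t ih =>
    intro acc x h
    exact ih _ x (pv_step1_mem D acc a x h)

theorem pv_step1_sub (D acc : List Int) (p : String × List Int) (x : Int)
    (h : x ∈ pvStep1 D acc p) : x ∈ acc ∨ x ∈ p.2 := by
  unfold pvStep1 at h
  rcases pv_step1b_cases acc (p.2.filter (fun c => !(D.contains c))) with he | ⟨k, hk, _, he⟩
  · rw [he] at h; exact Or.inl h
  · rw [he] at h
    rcases List.mem_append.mp h with h1 | h1
    · exact Or.inl h1
    · have hx : x = k := by simpa using h1
      subst hx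
      have : x ∈ p.2.filter (fun c => !(D.contains c)) := by rw [hk]; simp
      exact Or.inr (List.mem_of_mem_filter this)

theorem pv_fold_sub (D : List Int) (l : List (String × List Int)) :
    ∀ acc x, x ∈ l.foldl (pvStep1 D) acc → x ∈ acc ∨ x ∈ l.flatMap (fun p => p.2) := by
  induction l with
  | nil => intro acc x h; exact Or.inl (by simpa using h)
  | cons a t ih =>
    intro acc x h
    rcases ih _ x h with h1 | h1
    · rcases pv_step1_sub D acc a x h1 with h2 | h2
      · exact Or.inl h2
      · exact Or.inr (by simp [h2])
    · obtain ⟨p, hp, hx⟩ := List.mem_flatMap.mp h1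
      exact Or.inr (List.mem_flatMap.mpr ⟨p, List.mem_cons_of_mem _ hp, hx⟩)

theorem pv_step1_nodup (D acc : List Int) (p : String × List Int) (h : acc.Nodup) :
    (pvStep1 D acc p).Nodup := by
  unfold pvStep1
  rcases pv_step1b_cases acc (p.2.filter (fun c => !(D.contains c))) with he | ⟨k, _, hc, he⟩ <;> rw [he]
  · exact h
  · refine List.Nodup.append h (List.nodup_singleton k) ?_
    intro a ha hb
    have : a = k := by simpa using hb
    subst this
    have : a ∈ acc → (acc.contains a) = true := fun hm => by simpa using hm
    rw [this ha] at hc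
    exact absurd hc (by simp)

theorem pv_fold_nodup (D : List Int) (l : List (String × List Int)) :
    ∀ acc, acc.Nodup → (l.foldl (pvStep1 D) acc).Nodup := by
  induction l with
  | nil => intro acc h; simpa using h
  | cons a t ih => intro acc h; exact ih _ (pv_step1_nodup D acc a h)

theorem pv_step1_force (D acc : List Int) (p : String × List Int) (k : Int)
    (h : p.2.filter (fun c => !(D.contains c)) = [k]) : k ∈ pvStep1 D acc p := by
  unfold pvStep1
  rw [h]
  unfold pvStep1b
  split_ifs with h2
  · simp
  · push_neg at h2
    have h3 := h2 (by simp)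
    have h4 : acc.contains ([k].headD 0) = true := by
      cases hcc : acc.contains ([k].headD 0) with
      | false => exact absurd hcc h3
      | true => rfl
    simpa using h4

theorem pv_fold_force (D : List Int) (l : List (String × List Int)) (p : String × List Int) (k : Int)
    (h : p.2.filter (fun c => !(D.contains c)) = [k]) :
    ∀ acc, p ∈ l → k ∈ l.foldl (pvStep1 D) acc := by
  induction l with
  | nil => intro acc hp; simp at hp
  | cons a t ih =>
    intro acc hp
    rcases List.mem_cons.mp hp with rfl | hp'
    · exact pv_fold_mem D t _ k (pv_step1_force D acc p k h)
    · exact ih _ hp'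

theorem pv_fold_ext (D : List Int) (l : List (String × List Int)) :
    ∀ acc, ∃ t, l.foldl (pvStep1 D) acc = acc ++ t := by
  induction l with
  | nil => intro acc; exact ⟨[], by simp⟩
  | cons a t ih =>
    intro acc
    obtain ⟨t1, ht1⟩ := ih (pvStep1 D acc a)
    rcases pv_step1b_cases acc (a.2.filter (fun c => !(D.contains c))) with he | ⟨k, _, _, he⟩
    · have he' : pvStep1 D acc a = acc := he
      rw [List.foldl_cons, ht1, he']
      exact ⟨t1, rfl⟩
    · have he' : pvStep1 D acc a = acc ++ [k] := he
      rw [List.foldl_cons, ht1, he', List.append_assoc]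
      exact ⟨[k] ++ t1, rfl⟩

theorem pv_nodup_sub_length (l L : List Int) (hnd : l.Nodup) (hsub : ∀ x ∈ l, x ∈ L) :
    l.length ≤ L.length := by
  calc l.length = l.toFinset.card := (List.toFinset_card_of_nodup hnd).symm
    _ ≤ L.toFinset.card := Finset.card_le_card (fun x hx => by
        rw [List.mem_toFinset] at hx ⊢; exact hsub x hx)
    _ ≤ L.length := List.toFinset_card_le L

theorem pv_step_grow (S : List (String × List Int)) (D : List Int)
    (hne : pvStep S D ≠ D) : D.length < (pvStep S D).length := by
  obtain ⟨t, ht⟩ := pv_fold_ext D S D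
  have ht' : pvStep S D = D ++ t := ht
  rw [ht'] at hne ⊢
  cases t with
  | nil => simp at hne
  | cons a t' => simp

theorem pv_step_nodup (S : List (String × List Int)) (D : List Int) (h : D.Nodup) :
    (pvStep S D).Nodup :=
  pv_fold_nodup D S D h

theorem pv_step_sub (S : List (String × List Int)) (D : List Int)
    (hsub : ∀ x ∈ D, x ∈ S.flatMap (fun p => p.2)) :
    ∀ x ∈ pvStep S D, x ∈ S.flatMap (fun p => p.2) := by
  intro x hx
  rcases pv_fold_sub D S D x hx with h | h
  · exact hsub x h
  · exact h

theorem pv_iter_fix (S : List (String × List Int)) :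
    ∀ (n : Nat) (D : List Int), D.Nodup → (∀ x ∈ D, x ∈ S.flatMap (fun p => p.2)) →
      (S.flatMap (fun p => p.2)).length < D.length + n →
      pvStep S (pvIter S n D) = pvIter S n D := by
  intro n
  induction n with
  | zero =>
    intro D hnd hsub hlt
    simp only [pvIter]
    by_contra hne
    have h1 := pv_step_grow S D hne
    have h2 := pv_nodup_sub_length (pvStep S D) (S.flatMap (fun p => p.2))
      (pv_step_nodup S D hnd) (pv_step_sub S D hsub)
    omega
  | succ n ih =>
    intro D hnd hsub hlt
    simp only [pvIter]
    split_ifs with hfix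
    · exact hfix
    · have h1 := pv_step_grow S D hfix
      exact ih (pvStep S D) (pv_step_nodup S D hnd) (pv_step_sub S D hsub) (by omega)

theorem pv_closure_fix (S : List (String × List Int)) :
    pvStep S (pvClosure S) = pvClosure S := by
  apply pv_iter_fix S ((S.map (fun p => p.2.length)).sum + 1) [] List.nodup_nil (by simp)
  have h : (S.flatMap (fun p => p.2)).length = (S.map (fun p => p.2.length)).sum := by
    simp [List.length_flatMap]
  omega

theorem pv_filter_singleton (l : List Int) (pred : Int → Bool) (k : Int)
    (hnd : l.Nodup) (hk : k ∈ l) (hpk : pred k = true)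
    (hall : ∀ c ∈ l, pred c = true → c = k) : l.filter pred = [k] := by
  induction l with
  | nil => simp at hk
  | cons a t ih =>
    simp only [List.nodup_cons] at hnd
    rcases List.mem_cons.mp hk with rfl | hkt
    · rw [List.filter_cons_of_pos hpk]
      have hnil : t.filter pred = [] := by
        apply List.filter_eq_nil_iff.mpr
        intro c hc hpc
        have hck := hall c (List.mem_cons_of_mem _ hc) hpc
        exact absurd (hck ▸ hc) hnd.1
      rw [hnil]
    · have hpa : pred a = false := by
        cases hq : pred a with
        | false => rfl
        | true =>
          have ha := hall a List.mem_cons_self hq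
          exact absurd (ha ▸ hkt) hnd.1
      rw [List.filter_cons_of_neg (by simp [hpa])]
      exact ih hnd.2 hkt (fun c hc hpc => hall c (List.mem_cons_of_mem _ hc) hpc)

theorem pv_closure_closed (S : List (String × List Int)) (p : String × List Int) (k : Int)
    (hp : p ∈ S) (h : p.2.filter (fun c => !((pvClosure S).contains c)) = [k]) : False := by
  have hk : k ∈ pvStep S (pvClosure S) := pv_fold_force _ S p k h (pvClosure S) hp
  rw [pv_closure_fix] at hk
  have hmem : k ∈ p.2.filter (fun c => !((pvClosure S).contains c)) := by rw [h]; simp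
  have hflt := List.of_mem_filter hmem
  simp only [Bool.not_eq_eq_eq_not, Bool.not_false] at hflt
  have : (pvClosure S).contains k = true := by simpa using hk
  rw [this] at hflt
  exact absurd hflt (by simp)

-- the candidate list of op with the already-assigned opcodes removed
def pvResid (asg : List Int) (cs : List Int) : List Int :=
  cs.filter (fun c => !(asg.contains c))

theorem pv_queued_E (S : List (String × List Int)) (p : String × List Int) (hp : p ∈ S)
    (hnd : p.2.Nodup) (Dt : List Int) (hDt : ∀ x ∈ Dt, x ∈ pvClosure S) (k : Int)
    (hres : pvResid Dt p.2 = [k]) : k ∈ pvClosure S ∧ ∀ c ∈ p.2, c ∈ pvClosure S := by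
  have hkres : k ∈ pvResid Dt p.2 := by rw [hres]; simp
  have hkc : k ∈ p.2 := List.mem_of_mem_filter hkres
  have hkD : k ∈ pvClosure S := by
    by_contra hkn
    apply pv_closure_closed S p k hp
    apply pv_filter_singleton p.2 _ k hnd hkc (by simpa using hkn)
    intro c hc hpc
    have hcD : c ∉ pvClosure S := by simpa using hpc
    have hcDt : c ∉ Dt := fun hmem => hcD (hDt c hmem)
    have hcr : c ∈ pvResid Dt p.2 := List.mem_filter.mpr ⟨hc, by simpa using hcDt⟩
    rw [hres] at hcr
    simpa using hcr
  refine ⟨hkD, ?_⟩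
  intro c hc
  by_cases hcDt : c ∈ Dt
  · exact hDt c hcDt
  · have hcr : c ∈ pvResid Dt p.2 := List.mem_filter.mpr ⟨hc, by simpa using hcDt⟩
    rw [hres] at hcr
    have : c = k := by simpa using hcr
    rw [this]
    exact hkD

-- ---- the main simulation ----

def pvResidOf (S : List (String × List Int)) (mp : List (Int × String)) (o : String) : List Int :=
  pvResid (mp.map Prod.fst) ((List.lookup o S).getD [])

-- A's mutated dict, as a function of the original map and the assignments made so far
def pvMst (S : List (String × List Int)) (mp : List (Int × String)) : List (String × List Int) :=
  S.map (fun p => (p.1, pvResid (mp.map Prod.fst) p.2))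

-- the joint loop invariant
structure pvInv (S : List (String × List Int)) (Q : List String) (mp : List (Int × String)) : Prop where
  qkeys : ∀ o ∈ Q, o ∈ S.map Prod.fst
  qnd : Q.Nodup
  qfresh : ∀ o ∈ Q, o ∉ mp.map Prod.snd
  qone : ∀ o ∈ Q, ∃ k, pvResidOf S mp o = [k]
  dres : ∀ pr ∈ mp, pvResidOf S mp pr.2 = []
  asub : ∀ k ∈ mp.map Prod.fst, k ∈ pvClosure S
  sdr : ∃ f : String → Int,
    (∀ p ∈ S, (∀ c ∈ p.2, c ∈ pvClosure S) → p.1 ∉ mp.map Prod.snd →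
      pvResidOf S mp p.1 ≠ [] → f p.1 ∈ pvResidOf S mp p.1) ∧
    (∀ p ∈ S, ∀ q ∈ S, (∀ c ∈ p.2, c ∈ pvClosure S) → (∀ c ∈ q.2, c ∈ pvClosure S) →
      p.1 ∉ mp.map Prod.snd → q.1 ∉ mp.map Prod.snd →
      pvResidOf S mp p.1 ≠ [] → pvResidOf S mp q.1 ≠ [] → f p.1 = f q.1 → p.1 = q.1)

theorem pv_lookup_map (l : List (String × List Int)) (f : String → List Int → List Int) (a : String) :
    List.lookup a (l.map fun p => (p.1, f p.1 p.2)) = (List.lookup a l).map (f a) := by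
  induction l with
  | nil => simp
  | cons h t ih =>
    simp only [List.map_cons, List.lookup]
    rcases hb : (a == h.1) with _ | _
    · simp [ih]
    · simp only [beq_iff_eq] at hb; subst hb; simp

theorem pv_lookup_of_mem (S : List (String × List Int)) (hk : (S.map Prod.fst).Nodup)
    (p : String × List Int) (hp : p ∈ S) : List.lookup p.1 S = some p.2 := by
  induction S with
  | nil => simp at hp
  | cons h t ih =>
    simp only [List.map_cons, List.nodup_cons] at hk
    rcases List.mem_cons.mp hp with hp' | hp'
    · subst hp'; simp [List.lookup]
    · have hne : p.1 ≠ h.1 := by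
        intro he; exact hk.1 (he ▸ (List.mem_map.mpr ⟨p, hp', rfl⟩))
      have hb : (p.1 == h.1) = false := by simp [hne]
      simp [List.lookup, hb, ih hk.2 hp']

theorem pv_dinsert_append (mp : List (Int × String)) (k : Int) (v : String)
    (h : k ∉ mp.map Prod.fst) : pvDinsert mp k v = mp ++ [(k, v)] := by
  induction mp with
  | nil => rfl
  | cons hd t ih =>
    simp only [List.map_cons, List.mem_cons, not_or] at h
    simp [pvDinsert, Ne.symm h.1, ih h.2]

theorem pv_hasSDR_sound (L : List (String × List Int)) :
    ∀ (used : List Int), (L.map Prod.fst).Nodup →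
    pvHasSDR ((L.map (·.2)).filter (· ≠ [])) used = true →
    ∃ f : String → Int,
      (∀ p ∈ L, p.2 ≠ [] → f p.1 ∈ p.2 ∧ f p.1 ∉ used) ∧
      (∀ p ∈ L, ∀ q ∈ L, p.2 ≠ [] → q.2 ≠ [] → f p.1 = f q.1 → p.1 = q.1) := by
  induction L with
  | nil =>
    intro used _ _
    exact ⟨fun _ => 0, by simp, by simp⟩
  | cons hd t ih =>
    intro used hk h
    simp only [List.map_cons, List.nodup_cons] at hk
    by_cases hcs : hd.2 = []
    · simp only [List.map_cons, hcs, List.filter_cons, decide_not] at h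
      simp at h
      obtain ⟨f, hf1, hf2⟩ := ih used hk.2 (by simpa using h)
      refine ⟨f, ?_, ?_⟩
      · intro p hp hpne
        rcases List.mem_cons.mp hp with rfl | hp'
        · exact absurd hcs hpne
        · exact hf1 p hp' hpne
      · intro p hp q hq hpne hqne he
        rcases List.mem_cons.mp hp with rfl | hp' <;>
          rcases List.mem_cons.mp hq with rfl | hq'
        · rfl
        · exact absurd hcs hpne
        · exact absurd hcs hqne
        · exact hf2 p hp' q hq' hpne hqne he
    · simp only [List.map_cons, List.filter_cons] at h
      rw [if_pos (by simpa using hcs)] at h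
      simp only [pvHasSDR, List.any_eq_true, Bool.and_eq_true, Bool.not_eq_true'] at h
      obtain ⟨k, hkmem, hknu, hrec⟩ := h
      obtain ⟨f, hf1, hf2⟩ := ih (k :: used) hk.2 hrec
      refine ⟨fun x => if x = hd.1 then k else f x, ?_, ?_⟩
      · intro p hp hpne
        beta_reduce
        rcases List.mem_cons.mp hp with rfl | hp'
        · exact ⟨by simp [hkmem], by simpa using hknu⟩
        · have hne : p.1 ≠ hd.1 := fun he => hk.1 (he ▸ List.mem_map.mpr ⟨p, hp', rfl⟩)
          rw [if_neg hne]
          obtain ⟨h1, h2⟩ := hf1 p hp' hpne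
          exact ⟨h1, fun hm => h2 (List.mem_cons_of_mem _ hm)⟩
      · intro p hp q hq hpne hqne he
        beta_reduce at he
        rcases List.mem_cons.mp hp with rfl | hp' <;>
          rcases List.mem_cons.mp hq with rfl | hq'
        · rfl
        · exfalso
          have hneq : q.1 ≠ p.1 := fun h' => hk.1 (h' ▸ List.mem_map.mpr ⟨q, hq', rfl⟩)
          rw [if_pos rfl, if_neg hneq] at he
          exact (hf1 q hq' hqne).2 (he ▸ List.mem_cons_self)
        · exfalso
          have hneq : p.1 ≠ q.1 := fun h' => hk.1 (h' ▸ List.mem_map.mpr ⟨p, hp', rfl⟩)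
          rw [if_neg hneq, if_pos rfl] at he
          exact (hf1 p hp' hpne).2 (he ▸ List.mem_cons_self)
        · have hnp : p.1 ≠ hd.1 := fun h' => hk.1 (h' ▸ List.mem_map.mpr ⟨p, hp', rfl⟩)
          have hnq : q.1 ≠ hd.1 := fun h' => hk.1 (h' ▸ List.mem_map.mpr ⟨q, hq', rfl⟩)
          rw [if_neg hnp, if_neg hnq] at he
          exact hf2 p hp' q hq' hpne hqne he

theorem pv_resid_append (asg : List Int) (k : Int) (cs : List Int) :
    pvResid (asg ++ [k]) cs = (pvResid asg cs).filter (fun c => !(c == k)) := by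
  unfold pvResid
  rw [List.filter_filter]
  apply List.filter_congr
  intro c _
  by_cases h1 : c ∈ asg <;> by_cases h2 : c = k <;> simp [h1, h2]

theorem pv_resid_erase (asg : List Int) (k : Int) (cs : List Int) (h : cs.Nodup) :
    (pvResid asg cs).erase k = pvResid (asg ++ [k]) cs := by
  rw [pv_resid_append]
  unfold pvResid
  rw [List.Nodup.erase_eq_filter (List.Nodup.filter _ h)]
  apply List.filter_congr
  intro c _
  simp [bne]

theorem pv_resid_not_mem (asg : List Int) (k : Int) (cs : List Int)
    (h : k ∉ pvResid asg cs) : pvResid (asg ++ [k]) cs = pvResid asg cs := by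
  rw [pv_resid_append]
  apply List.filter_eq_self.mpr
  intro c hc
  simp only [Bool.not_eq_eq_eq_not, Bool.not_true, beq_eq_false_iff_ne, ne_eq]
  rintro rfl
  exact h hc

theorem pv_addContains_lookup (ct : List (Int × List String)) (c : Int) (o : String) (k : Int) :
    (List.lookup k (pvAddContains ct c o)).getD [] =
      (List.lookup k ct).getD [] ++ (if k = c then [o] else []) := by
  induction ct with
  | nil =>
    by_cases h : k = c
    · subst h; simp [pvAddContains, List.lookup]
    · have hb : (k == c) = false := by simp [h]
      simp [pvAddContains, List.lookup, hb, h]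
  | cons hd t ih =>
    obtain ⟨k', os⟩ := hd
    by_cases h1 : k' = c
    · subst h1
      simp only [pvAddContains, if_pos]
      by_cases h2 : k = k'
      · subst h2; simp [List.lookup]
      · have hb : (k == k') = false := by simp [h2]
        simp [List.lookup, hb, h2]
    · simp only [pvAddContains, if_neg h1]
      by_cases h2 : k = k'
      · subst h2
        have hkc : k ≠ c := fun he => h1 he
        simp [List.lookup, hkc]
      · have hb : (k == k') = false := by simp [h2]
        simp [List.lookup, hb, ih]

theorem pv_foldInner_lookup (cs : List Int) (o : String) (k : Int) :
    ∀ ct : List (Int × List String),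
    (List.lookup k (cs.foldl (fun ct c => pvAddContains ct c o) ct)).getD [] =
      (List.lookup k ct).getD [] ++ ((cs.filter (fun c => k == c)).map (fun _ => o)) := by
  induction cs with
  | nil => simp
  | cons c cs' ih =>
    intro ct
    simp only [List.foldl_cons, ih, pv_addContains_lookup, List.filter_cons]
    by_cases h : k = c
    · simp [h, List.append_assoc]
    · have hb : (k == c) = false := by simp [h]
      simp [h, hb]

theorem pv_filter_beq_nodup (l : List Int) (k : Int) (h : l.Nodup) :
    l.filter (fun c => k == c) = if k ∈ l then [k] else [] := by
  induction l with
  | nil => simp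
  | cons a t ih =>
    simp only [List.nodup_cons] at h
    rw [List.filter_cons]
    by_cases ha : k = a
    · subst ha
      have : t.filter (fun c => k == c) = [] := by
        apply List.filter_eq_nil_iff.mpr
        intro c hc hEq
        rw [beq_iff_eq] at hEq
        subst hEq
        exact h.1 hc
      simp [this]
    · have hb : (k == a) = false := by simp [ha]
      simp only [hb, Bool.false_eq_true, if_false, ih h.2]
      by_cases hm : k ∈ t
      · simp [hm, List.mem_cons, ha]
      · simp [hm, ha]

theorem pv_buildContains_lookup (S : List (String × List Int)) (k : Int)
    (hn : ∀ p ∈ S, p.2.Nodup) :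
    (List.lookup k (pvBuildContains S)).getD [] =
      (S.filter (fun p => decide (k ∈ p.2))).map Prod.fst := by
  suffices h : ∀ ct : List (Int × List String),
      (List.lookup k (S.foldl (fun ct p => p.2.foldl (fun ct c => pvAddContains ct c p.1) ct) ct)).getD [] =
        (List.lookup k ct).getD [] ++ (S.filter (fun p => decide (k ∈ p.2))).map Prod.fst by
    simpa using h []
  induction S with
  | nil => simp
  | cons p t ih =>
    intro ct
    have hp := hn p List.mem_cons_self
    have hn' : ∀ q ∈ t, q.2.Nodup := fun q hq => hn q (List.mem_cons_of_mem _ hq)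
    simp only [List.foldl_cons, ih hn', pv_foldInner_lookup, List.filter_cons]
    rw [pv_filter_beq_nodup _ _ hp]
    by_cases hm : k ∈ p.2
    · simp [hm, List.append_assoc]
    · simp [hm]

theorem pv_setEntry_map (S : List (String × List Int)) (g : String × List Int → List Int)
    (op : String) (nl : List Int) (hk : (S.map Prod.fst).Nodup) :
    pvSetEntry (S.map (fun p => (p.1, g p))) op nl =
      S.map (fun p => (p.1, if p.1 = op then nl else g p)) := by
  induction S with
  | nil => rfl
  | cons p t ih =>
    simp only [List.map_cons, List.nodup_cons] at hk ⊢
    by_cases h : p.1 = op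
    · rw [pvSetEntry, if_pos h, if_pos h]
      congr 1
      apply List.map_congr_left
      intro q hq
      have : q.1 ≠ op := fun he => hk.1 (h ▸ he ▸ List.mem_map.mpr ⟨q, hq, rfl⟩)
      rw [if_neg this]
    · rw [pvSetEntry, if_neg h, if_neg h, ih hk.2]

theorem pv_removePass_eq (k : Int) (M : List (String × List Int)) :
    pvRemovePass k M =
      (M.map (fun p => (p.1, if k ∈ p.2 then p.2.erase k else p.2)),
       (M.filter (fun p => decide (k ∈ p.2) && ((p.2.erase k).length == 1))).map Prod.fst) := by
  induction M with
  | nil => rfl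
  | cons p t ih =>
    simp only [pvRemovePass, ih, List.map_cons, List.filter_cons]
    by_cases h : k ∈ p.2
    · rw [if_pos h, if_pos h]
      by_cases h2 : (p.2.erase k).length = 1
      · have hb : ((p.2.erase k).length == 1) = true := by simpa using h2
        rw [if_pos h2]
        simp only [decide_eq_true h, hb, Bool.and_self, if_pos]
        simp
      · have hb : ((p.2.erase k).length == 1) = false := by simpa using h2
        rw [if_neg h2]
        simp only [decide_eq_true h, hb, Bool.true_and, Bool.false_eq_true, if_false]
    · rw [if_neg h, if_neg h]
      have hb : decide (k ∈ p.2) = false := by simpa using h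
      simp only [hb, Bool.false_and, Bool.false_eq_true, if_false]

theorem pv_removePass_fst (k : Int) (M : List (String × List Int)) :
    (pvRemovePass k M).1 = M.map (fun p => (p.1, if k ∈ p.2 then p.2.erase k else p.2)) := by
  rw [pv_removePass_eq]

theorem pv_removePass_snd (k : Int) (M : List (String × List Int)) :
    (pvRemovePass k M).2 =
      (M.filter (fun p => decide (k ∈ p.2) && ((p.2.erase k).length == 1))).map Prod.fst := by
  rw [pv_removePass_eq]

theorem pv_main (S : List (String × List Int)) (hk : (S.map Prod.fst).Nodup)
    (hn : ∀ p ∈ S, p.2.Nodup) :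
    ∀ (f : Nat) (Q : List String) (mp : List (Int × String))
      (asgL : List Int) (doneL : List String),
      pvInv S Q mp →
      (∀ c : Int, asgL.contains c = (mp.map Prod.fst).contains c) →
      (∀ o : String, doneL.contains o = (mp.map Prod.snd).contains o) →
      pvLoopA f (pvMst S mp) Q mp = pvLoopB S (pvBuildContains S) f Q asgL doneL mp := by
  intro f
  induction f with
  | zero => intro Q mp asgL doneL _ _ _; rfl
  | succ f ih =>
    intro Q mp asgL doneL hInv hasg hdone
    cases hQ : Q.getLast? with
    | none => simp only [pvLoopA, pvLoopB, hQ]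
    | some op =>
      have hQne : Q ≠ [] := by rintro rfl; simp at hQ
      have hgl : Q.getLast hQne = op := by
        rw [List.getLast?_eq_some_getLast hQne] at hQ
        exact Option.some.inj hQ
      have hQeq : Q.dropLast ++ [op] = Q := by
        rw [← hgl]; exact List.dropLast_append_getLast hQne
      have hopQ : op ∈ Q := by rw [← hQeq]; simp
      have hopnQ1 : op ∉ Q.dropLast := by
        have hnd := hInv.qnd
        rw [← hQeq] at hnd
        intro hmem
        exact (List.nodup_append.mp hnd).2.2 op hmem op (by simp) rfl
      obtain ⟨pop, hpopS, hpopfst⟩ := List.mem_map.mp (hInv.qkeys op hopQ)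
      have hlookS : List.lookup op S = some pop.2 := hpopfst ▸ pv_lookup_of_mem S hk pop hpopS
      have huniq : ∀ p ∈ S, p.1 = op → p.2 = pop.2 := by
        intro p hp hpo
        have h1 := pv_lookup_of_mem S hk p hp
        rw [hpo, hlookS] at h1
        exact (Option.some.inj h1).symm
      have hresidP : ∀ p ∈ S, pvResidOf S mp p.1 = pvResid (mp.map Prod.fst) p.2 := by
        intro p hp
        unfold pvResidOf
        rw [pv_lookup_of_mem S hk p hp]
        rfl
      obtain ⟨k0, hres⟩ := hInv.qone op hopQ
      have hresid : pvResid (mp.map Prod.fst) pop.2 = [k0] := by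
        rw [← hresidP pop hpopS, hpopfst]; exact hres
      have hEop := pv_queued_E S pop hpopS (hn pop hpopS) (mp.map Prod.fst) hInv.asub k0 hresid
      have hk0mem : k0 ∈ pvResid (mp.map Prod.fst) pop.2 := by rw [hresid]; simp
      have hk0cs : k0 ∈ pop.2 := List.mem_of_mem_filter hk0mem
      have hk0asg : k0 ∉ mp.map Prod.fst := by
        have h1 := List.of_mem_filter hk0mem
        simpa using h1
      have hopdone : op ∉ mp.map Prod.snd := hInv.qfresh op hopQ
      -- the common description of the ops appended to the worklist in this iteration
      have hresid1P : ∀ p ∈ S, pvResidOf S (mp ++ [(k0, op)]) p.1 =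
          pvResid (mp.map Prod.fst ++ [k0]) p.2 := by
        intro p hp
        unfold pvResidOf
        rw [pv_lookup_of_mem S hk p hp]
        simp
      -- residual of op after assigning k0 is empty
      have hresop1 : pvResid (mp.map Prod.fst ++ [k0]) pop.2 = [] := by
        rw [pv_resid_append, hresid]; simp
      -- dict lookup on A's mutated map
      have hlookM : List.lookup op (pvMst S mp) = some (pvResid (mp.map Prod.fst) pop.2) := by
        have h1 := pv_lookup_map S (fun _ c => pvResid (mp.map Prod.fst) c) op
        beta_reduce at h1
        unfold pvMst
        rw [h1, hlookS]
        rfl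
      have hcsA : (List.lookup op (pvMst S mp)).getD [] = [k0] := by
        rw [hlookM, Option.getD_some, hresid]
      have hcsB : (List.lookup op S).getD [] = pop.2 := by rw [hlookS]; rfl
      -- B picks the same opcode
      have hfind : (pop.2.find? (fun c => !(asgL.contains c))).getD 0 = k0 := by
        have hpx : (fun c => !(asgL.contains c)) = (fun c => !((mp.map Prod.fst).contains c)) :=
          funext fun c => by rw [hasg c]
        rw [hpx, ← List.head?_filter]
        have hresid' : pop.2.filter (fun c => !((mp.map Prod.fst).contains c)) = [k0] := hresid
        rw [hresid']
        rfl
      -- both sides extend the mapping identically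
      have hmp1 : pvDinsert mp k0 op = mp ++ [(k0, op)] :=
        pv_dinsert_append mp k0 op hk0asg
      have hfst1 : (mp ++ [(k0, op)]).map Prod.fst = mp.map Prod.fst ++ [k0] := by simp
      have hsnd1 : (mp ++ [(k0, op)]).map Prod.snd = mp.map Prod.snd ++ [op] := by simp
      -- A's mutated map after this iteration
      have hM1 : pvSetEntry (pvMst S mp) op ([k0].dropLast) =
          S.map (fun p => (p.1, if p.1 = op then [] else pvResid (mp.map Prod.fst) p.2)) := by
        unfold pvMst
        exact pv_setEntry_map S (fun p => pvResid (mp.map Prod.fst) p.2) op [] hk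
      have hM2 : (pvRemovePass k0 (pvSetEntry (pvMst S mp) op ([k0].dropLast))).1 =
          pvMst S (mp ++ [(k0, op)]) := by
        rw [hM1, pv_removePass_fst]
        unfold pvMst
        rw [hfst1, List.map_map]
        apply List.map_congr_left
        intro p hp
        simp only [Function.comp]
        congr 1
        by_cases hpo : p.1 = op
        · rw [if_pos hpo]
          have hpcs := huniq p hp hpo
          simp only [List.not_mem_nil, if_false]
          rw [hpcs, hresop1]
        · rw [if_neg hpo]
          by_cases hkm : k0 ∈ pvResid (mp.map Prod.fst) p.2
          · rw [if_pos hkm, pv_resid_erase _ _ _ (hn p hp)]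
          · rw [if_neg hkm, pv_resid_not_mem _ _ _ hkm]
      -- the ops appended to the worklist, in dict order (the same for A and B)
      have hqaddA : (pvRemovePass k0 (pvSetEntry (pvMst S mp) op ([k0].dropLast))).2 =
          (S.filter (fun p => !((mp.map Prod.snd ++ [op]).contains p.1) &&
            (decide (k0 ∈ p.2) && ((pvResid (mp.map Prod.fst ++ [k0]) p.2).length == 1)))).map Prod.fst := by
        rw [hM1, pv_removePass_snd]
        rw [List.filter_map, List.map_map]
        have hfst : (Prod.fst ∘ fun p : String × List Int =>
            (p.1, if p.1 = op then [] else pvResid (mp.map Prod.fst) p.2)) = Prod.fst := rfl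
        rw [hfst]
        congr 1
        apply List.filter_congr
        intro p hp
        simp only [Function.comp]
        by_cases hpo : p.1 = op
        · simp [hpo]
        · by_cases hpd : p.1 ∈ mp.map Prod.snd
          · obtain ⟨pr, hpr, hpr2⟩ := List.mem_map.mp hpd
            have hrd := hInv.dres pr hpr
            rw [hpr2] at hrd
            have hrd' : pvResid (mp.map Prod.fst) p.2 = [] := by
              rw [← hresidP p hp]; exact hrd
            simp [hpo, hrd', hpd]
          · by_cases hkm : k0 ∈ p.2
            · have hkr : k0 ∈ pvResid (mp.map Prod.fst) p.2 := by
                unfold pvResid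
                apply List.mem_filter.mpr
                refine ⟨hkm, by simpa using hk0asg⟩
              have herase := pv_resid_erase (mp.map Prod.fst) k0 p.2 (hn p hp)
              simp [hpo, hpd, hkm, hkr, herase]
            · have hkr : k0 ∉ pvResid (mp.map Prod.fst) p.2 :=
                fun hmem => hkm (List.mem_of_mem_filter hmem)
              simp [hpo, hpd, hkm, hkr]
      -- B's appended ops are the same list
      have hqaddB : (((List.lookup k0 (pvBuildContains S)).getD []).filter (fun o =>
            !((PySem.Set.add doneL op).contains o) &&
            ((((List.lookup o S).getD []).countP
                (fun c => !((PySem.Set.add asgL k0).contains c))) == 1))) =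
          (S.filter (fun p => !((mp.map Prod.snd ++ [op]).contains p.1) &&
            (decide (k0 ∈ p.2) && ((pvResid (mp.map Prod.fst ++ [k0]) p.2).length == 1)))).map Prod.fst := by
        have haddA : PySem.Set.add asgL k0 = asgL ++ [k0] := by
          apply PySem.Set.add_of_not_mem
          have h1 : asgL.contains k0 = false := by
            rw [hasg k0]; simpa using hk0asg
          simpa using h1
        have haddD : PySem.Set.add doneL op = doneL ++ [op] := by
          apply PySem.Set.add_of_not_mem
          have h1 : doneL.contains op = false := by
            rw [hdone op]; simpa using hopdone
          simpa using h1
        rw [haddA, haddD, pv_buildContains_lookup S k0 hn]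
        rw [List.filter_map, List.filter_filter]
        congr 1
        apply List.filter_congr
        intro p hp
        simp only [Function.comp, PySem.Set.contains_eq_listContains]
        have hcntD : ((doneL ++ [op]).contains p.1) = ((mp.map Prod.snd ++ [op]).contains p.1) := by
          have h' : p.1 ∈ doneL ↔ p.1 ∈ mp.map Prod.snd := by simpa using hdone p.1
          simp [h']
        have hcnt : ((List.lookup p.1 S).getD []).countP (fun c => !((asgL ++ [k0]).contains c)) =
            (pvResid (mp.map Prod.fst ++ [k0]) p.2).length := by
          rw [pv_lookup_of_mem S hk p hp, Option.getD_some]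
          rw [List.countP_eq_length_filter]
          congr 1
          apply List.filter_congr
          intro c _
          have h' : c ∈ asgL ↔ c ∈ mp.map Prod.fst := by simpa using hasg c
          simp [h']
        rw [hcnt, hcntD]
        by_cases hkm : k0 ∈ p.2
        · simp [hkm, Bool.and_comm]
        · simp [hkm]
      -- the new worklist invariant
      have hInv1 : pvInv S (Q.dropLast ++
          (S.filter (fun p => !((mp.map Prod.snd ++ [op]).contains p.1) &&
            (decide (k0 ∈ p.2) && ((pvResid (mp.map Prod.fst ++ [k0]) p.2).length == 1)))).map Prod.fst)
          (mp ++ [(k0, op)]) := by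
        obtain ⟨f0, hf1, hf2⟩ := hInv.sdr
        have hfop : f0 op = k0 := by
          have h1 := hf1 pop hpopS hEop.2 (by rw [hpopfst]; exact hopdone)
            (by rw [hpopfst, hres]; simp)
          rw [hpopfst, hres] at h1
          simpa using h1
        -- membership in the appended part
        have hmemAdd : ∀ o, o ∈ (S.filter (fun p => !((mp.map Prod.snd ++ [op]).contains p.1) &&
            (decide (k0 ∈ p.2) && ((pvResid (mp.map Prod.fst ++ [k0]) p.2).length == 1)))).map Prod.fst →
            ∃ p ∈ S, p.1 = o ∧ p.1 ∉ mp.map Prod.snd ∧ p.1 ≠ op ∧ k0 ∈ p.2 ∧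
              (pvResid (mp.map Prod.fst ++ [k0]) p.2).length = 1 := by
          intro o ho
          obtain ⟨p, hpf, rfl⟩ := List.mem_map.mp ho
          have hpS := List.mem_of_mem_filter hpf
          have hcond := List.of_mem_filter hpf
          simp only [Bool.and_eq_true, Bool.not_eq_true', beq_iff_eq, decide_eq_true_eq] at hcond
          obtain ⟨hc1, hc2, hc3⟩ := hcond
          have hnmem : p.1 ∉ mp.map Prod.snd ∧ p.1 ≠ op := by
            constructor
            · intro hmem
              have : ((mp.map Prod.snd ++ [op]).contains p.1) = true := by simp [hmem]
              rw [this] at hc1; exact absurd hc1 (by simp)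
            · intro hmem
              have : ((mp.map Prod.snd ++ [op]).contains p.1) = true := by simp [hmem]
              rw [this] at hc1; exact absurd hc1 (by simp)
          exact ⟨p, hpS, rfl, hnmem.1, hnmem.2, hc2, hc3⟩
        constructor
        · -- qkeys
          intro o ho
          rcases List.mem_append.mp ho with h1 | h1
          · exact hInv.qkeys o (List.mem_of_mem_dropLast h1)
          · obtain ⟨p, hp, rfl, _⟩ := hmemAdd o h1
            exact List.mem_map.mpr ⟨p, hp, rfl⟩
        · -- qnd
          apply List.Nodup.append
          · exact List.Nodup.sublist (List.dropLast_sublist Q) hInv.qnd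
          · exact List.Nodup.sublist
              (List.Sublist.map _ List.filter_sublist) hk
          · intro o h1 h2
            obtain ⟨p, hp, hpe, _, hpo, hkm, hlen1⟩ := hmemAdd o h2
            have hoQ : o ∈ Q := List.mem_of_mem_dropLast h1
            obtain ⟨k1, hk1⟩ := hInv.qone o hoQ
            have hres_o : pvResid (mp.map Prod.fst) p.2 = [k1] := by
              rw [← hresidP p hp, hpe]; exact hk1
            have hkr : k0 ∈ pvResid (mp.map Prod.fst) p.2 := by
              unfold pvResid
              exact List.mem_filter.mpr ⟨hkm, by simpa using hk0asg⟩
            rw [hres_o] at hkr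
            have : k0 = k1 := by simpa using hkr
            subst this
            rw [← pv_resid_erase _ _ _ (hn p hp), hres_o] at hlen1
            simp at hlen1
        · -- qfresh
          intro o ho
          rw [hsnd1]
          rcases List.mem_append.mp ho with h1 | h1
          · have hf := hInv.qfresh o (List.mem_of_mem_dropLast h1)
            have hne : o ≠ op := fun he => hopnQ1 (he ▸ h1)
            simp [hf, hne]
          · obtain ⟨p, hp, rfl, hnd, hne, _⟩ := hmemAdd o h1
            simp [hnd, hne]
        · -- qone
          intro o ho
          rcases List.mem_append.mp ho with h1 | h1
          · have hoQ : o ∈ Q := List.mem_of_mem_dropLast h1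
            obtain ⟨po, hpoS, hpofst⟩ := List.mem_map.mp (hInv.qkeys o hoQ)
            obtain ⟨k1, hk1⟩ := hInv.qone o hoQ
            have hone : o ≠ op := fun he => hopnQ1 (he ▸ h1)
            have hodone : o ∉ mp.map Prod.snd := hInv.qfresh o hoQ
            have hro : pvResid (mp.map Prod.fst) po.2 = [k1] := by
              rw [← hresidP po hpoS, hpofst]; exact hk1
            have hEpo := pv_queued_E S po hpoS (hn po hpoS) (mp.map Prod.fst) hInv.asub k1 hro
            have hf0o : f0 o = k1 := by
              have h2 := hf1 po hpoS hEpo.2 (by rw [hpofst]; exact hodone)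
                (by rw [hpofst, hk1]; simp)
              rw [hpofst, hk1] at h2
              simpa using h2
            have hk1ne : k1 ≠ k0 := by
              intro he
              have heq : po.1 = pop.1 := by
                apply hf2 po hpoS pop hpopS hEpo.2 hEop.2 (by rw [hpofst]; exact hodone)
                  (by rw [hpopfst]; exact hopdone)
                  (by rw [hpofst, hk1]; simp) (by rw [hpopfst, hres]; simp)
                  (by rw [hpofst, hpopfst, hf0o, hfop, he])
              exact hone (by rw [← hpofst, heq, hpopfst])
            refine ⟨k1, ?_⟩
            rw [← hpofst, hresid1P po hpoS, pv_resid_append]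
            rw [hro]
            simp [hk1ne]
          · obtain ⟨p, hp, rfl, _, _, _, hlen1⟩ := hmemAdd o h1
            obtain ⟨a, ha⟩ := List.length_eq_one_iff.mp hlen1
            refine ⟨a, ?_⟩
            rw [hresid1P p hp, ha]
        · -- dres
          intro pr hpr
          rcases List.mem_append.mp hpr with h1 | h1
          · have hold := hInv.dres pr h1
            unfold pvResidOf at hold ⊢
            rw [hfst1, pv_resid_append]
            rw [show pvResid (mp.map Prod.fst) ((List.lookup pr.2 S).getD []) = [] from hold]
            rfl
          · have : pr = (k0, op) := by simpa using h1
            subst this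
            unfold pvResidOf
            rw [hfst1]
            simp only
            rw [hlookS, Option.getD_some]
            exact hresop1
        · -- asub
          intro k hkm
          rw [hfst1] at hkm
          rcases List.mem_append.mp hkm with h1 | h1
          · exact hInv.asub k h1
          · have : k = k0 := by simpa using h1
            rw [this]
            exact hEop.1
        · -- sdr
          refine ⟨f0, ?_, ?_⟩
          · intro p hp hEp hnd hne
            rw [hresid1P p hp] at hne ⊢
            rw [hsnd1] at hnd
            have hnd' : p.1 ∉ mp.map Prod.snd := fun h1 => hnd (List.mem_append_left _ h1)
            have hpo : p.1 ≠ op := fun h1 => hnd (by simp [h1])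
            have hneo : pvResid (mp.map Prod.fst) p.2 ≠ [] := by
              intro h1
              apply hne
              rw [pv_resid_append, h1]
              rfl
            have hmem := hf1 p hp hEp hnd' (by rw [hresidP p hp]; exact hneo)
            rw [hresidP p hp] at hmem
            have hfne : f0 p.1 ≠ k0 := by
              intro he
              have heq : p.1 = pop.1 := by
                apply hf2 p hp pop hpopS hEp hEop.2 hnd' (by rw [hpopfst]; exact hopdone)
                  (by rw [hresidP p hp]; exact hneo) (by rw [hpopfst, hres]; simp)
                  (by rw [hpopfst, hfop]; exact he)
              exact hpo (by rw [heq, hpopfst])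
            rw [pv_resid_append]
            exact List.mem_filter.mpr ⟨hmem, by simpa using hfne⟩
          · intro p hp q hq hEp hEq hpd hqd hpne hqne he
            rw [hsnd1] at hpd hqd
            rw [hresid1P p hp] at hpne
            rw [hresid1P q hq] at hqne
            apply hf2 p hp q hq hEp hEq
              (fun h1 => hpd (List.mem_append_left _ h1))
              (fun h1 => hqd (List.mem_append_left _ h1))
              ?_ ?_ he
            · rw [hresidP p hp]
              intro h1
              apply hpne
              rw [pv_resid_append, h1]
              rfl
            · rw [hresidP q hq]
              intro h1
              apply hqne
              rw [pv_resid_append, h1]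
              rfl
      -- now both loops take one identical step
      simp only [pvLoopA, pvLoopB, hQ]
      have hkA : (([k0] : List Int).getLast?).getD 0 = k0 := rfl
      rw [hcsA, hcsB, hkA, hfind, hmp1, hM2, hqaddA, hqaddB]
      exact ih (Q.dropLast ++ _) (mp ++ [(k0, op)]) (PySem.Set.add asgL k0)
        (PySem.Set.add doneL op) hInv1
        (by
          intro c
          have haddA : PySem.Set.add asgL k0 = asgL ++ [k0] := by
            apply PySem.Set.add_of_not_mem
            have h1 : asgL.contains k0 = false := by
              rw [hasg k0]; simpa using hk0asg
            simpa using h1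
          rw [haddA, hfst1]
          have h' : c ∈ asgL ↔ c ∈ mp.map Prod.fst := by simpa using hasg c
          simp [h'])
        (by
          intro o
          have haddD : PySem.Set.add doneL op = doneL ++ [op] := by
            apply PySem.Set.add_of_not_mem
            have h1 : doneL.contains op = false := by
              rw [hdone op]; simpa using hopdone
            simpa using h1
          rw [haddD, hsnd1]
          have h' : o ∈ doneL ↔ o ∈ mp.map Prod.snd := by simpa using hdone o
          simp [h'])

-- ===== VERDICT (by name: the statement is the Claim_ definition above) =====
theorem find_opcode_mapping_spec : Claim_equal_find_opcode_mapping := by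
  intro S _ hpre
  obtain ⟨hk, hn, hsdr⟩ := hpre
  unfold Spec_find_opcode_mapping find_opcode_mapping find_opcode_mapping_alt
  have hmst : pvMst S [] = S := by
    unfold pvMst pvResid
    simp
  have hQ0 : ∀ o ∈ (S.filter (fun p => p.2.length == 1)).map (Prod.fst),
      ∃ p ∈ S, p.1 = o ∧ p.2.length = 1 := by
    intro o ho
    obtain ⟨p, hp, rfl⟩ := List.mem_map.mp ho
    exact ⟨p, List.mem_of_mem_filter hp, rfl, by simpa using List.of_mem_filter hp⟩
  have hInv : pvInv S ((S.filter (fun p => p.2.length == 1)).map (·.1)) [] := by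
    constructor
    · intro o ho
      obtain ⟨p, hp, rfl, _⟩ := hQ0 o ho
      exact List.mem_map.mpr ⟨p, hp, rfl⟩
    · exact List.Nodup.sublist (List.Sublist.map _ (List.filter_sublist)) hk
    · simp
    · intro o ho
      obtain ⟨p, hp, rfl, hlen⟩ := hQ0 o ho
      obtain ⟨a, ha⟩ := List.length_eq_one_iff.mp hlen
      refine ⟨a, ?_⟩
      unfold pvResidOf pvResid
      rw [pv_lookup_of_mem S hk p hp]
      simp [ha]
    · simp
    · simp
    · obtain ⟨f, hf1, hf2⟩ := pv_hasSDR_sound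
        (S.filter (fun p => p.2.all (fun c => (pvClosure S).contains c))) [] 
        (List.Nodup.sublist (List.Sublist.map _ (List.filter_sublist)) hk) hsdr
      have hro : ∀ p, p ∈ S → pvResidOf S [] p.1 = p.2 := by
        intro p hp
        unfold pvResidOf pvResid
        rw [pv_lookup_of_mem S hk p hp]
        simp
      have hmemL : ∀ p, p ∈ S → (∀ c ∈ p.2, c ∈ pvClosure S) →
          p ∈ S.filter (fun p => p.2.all (fun c => (pvClosure S).contains c)) := by
        intro p hp hEp
        apply List.mem_filter.mpr
        refine ⟨hp, ?_⟩
        simp only [List.all_eq_true]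
        intro c hc
        simpa using hEp c hc
      refine ⟨f, ?_, ?_⟩
      · intro p hp hEp _ hne
        rw [hro p hp] at hne ⊢
        exact (hf1 p (hmemL p hp hEp) hne).1
      · intro p hp q hq hEp hEq _ _ hpne hqne he
        rw [hro p hp] at hpne
        rw [hro q hq] at hqne
        exact hf2 p (hmemL p hp hEp) q (hmemL q hq hEq) hpne hqne he
  have := pv_main S hk hn (S.length + (S.map (fun p => p.2.length)).sum + 1)
    ((S.filter (fun p => p.2.length == 1)).map (·.1)) [] [] [] hInv
    (by intro c; rfl) (by intro o; rfl)
  rw [hmst] at this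
  exact this
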